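-- pv_equiv track=rewrite | github.com/DakshBhalala/OOP_Coding_Exercise | remove_comments.py | remove_java_comments
-- ===== SOURCE A (Python) =====
-- def remove_java_comments(source):
--     result = []
--     state = 'NORMAL'
--     i = 0
--     while i < len(source):
--         char = source[i]
--
--         if state == 'NORMAL':
--             if char == '/' and i + 1 < len(source):
--                 next_char = source[i+1]
--                 if next_char == '/':
--                     state = 'LINE_COMMENT'
--                     i += 1
--                 elif next_char == '*':
--                     state = 'BLOCK_COMMENT'
--                     i += 1
--                 else:
--                     result.append(char)
--             elif char == '"':
--                 state = 'STRING'
--                 result.append(char)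
--             elif char == "'":
--                 state = 'CHAR'
--                 result.append(char)
--             else:
--                 result.append(char)
--
--         elif state == 'STRING':
--             result.append(char)
--             if char == '\\':
--                 if i + 1 < len(source):
--                     result.append(source[i+1])
--                     i += 1
--             elif char == '"':
--                 state = 'NORMAL'
--
--         elif state == 'CHAR':
--             result.append(char)
--             if char == '\\':
--                 if i + 1 < len(source):
--                     result.append(source[i+1])
--                     i += 1
--             elif char == "'":
--                 state = 'NORMAL'
--
--         elif state == 'LINE_COMMENT':
--             if char == '\n':
--                 state = 'NORMAL'
--                 result.append(char)
--
--         elif state == 'BLOCK_COMMENT':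
--             if char == '*' and i + 1 < len(source) and source[i+1] == '/':
--                 state = 'NORMAL'
--                 i += 1
--
--         i += 1
--
--     lines = "".join(result).splitlines()
--     clean_lines = [line for line in lines if line.strip() != ""]
--     return "\n".join(clean_lines) + "\n"
-- ===== SOURCE B (Python) =====
-- def remove_java_comments(source):
--     out = []
--     i, n = 0, len(source)
--     while i < n:
--         c = source[i]
--         if c == '/' and i + 1 < n and source[i+1] == '/':
--             j = source.find('\n', i + 2)
--             i = n if j == -1 else j        # leave the newline to be copied as ordinary text
--         elif c == '/' and i + 1 < n and source[i+1] == '*':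
--             j = source.find('*/', i + 2)
--             i = n if j == -1 else j + 2
--         elif c == '"' or c == "'":
--             out.append(c)
--             j = i + 1
--             while j < n:
--                 d = source[j]
--                 out.append(d)
--                 if d == '\\':
--                     if j + 1 < n:
--                         out.append(source[j+1])
--                         j += 1
--                 elif d == c:
--                     break
--                 j += 1
--             i = j + 1
--         else:
--             out.append(c)
--             i += 1
--     lines = "".join(out).splitlines()
--     clean_lines = [line for line in lines if line.strip() != ""]
--     return "\n".join(clean_lines) + "\n"
-- ===== Notes on version B (the rewrite author's own statement) =====
-- stated objective: faster
-- what changed: Replaces the char-by-char five-state FSM with a jump-scan: in normal mode comments are skipped in one str.find jump ('\n' / '*/') and string/char literals are copied by a dedicated inner literal loop, so no per-character state variable is maintained.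
import Mathlib
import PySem

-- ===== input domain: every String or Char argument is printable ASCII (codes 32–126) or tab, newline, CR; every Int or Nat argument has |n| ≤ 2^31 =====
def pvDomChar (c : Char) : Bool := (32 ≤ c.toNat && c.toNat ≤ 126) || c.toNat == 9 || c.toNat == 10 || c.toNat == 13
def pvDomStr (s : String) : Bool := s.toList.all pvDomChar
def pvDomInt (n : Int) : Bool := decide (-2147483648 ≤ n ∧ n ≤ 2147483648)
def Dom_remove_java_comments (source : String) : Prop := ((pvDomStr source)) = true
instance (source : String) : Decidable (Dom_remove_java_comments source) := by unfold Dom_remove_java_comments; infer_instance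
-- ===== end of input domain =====

-- B replaces A's char-by-char five-state FSM by a jump-scan (comments skipped with one str.find
-- jump, string/char literals copied by a dedicated inner loop); equal output proved for all inputs.

-- ===== PORT A =====
-- shared post-processing: the identical last three lines of both Python versions
-- ("".join(result).splitlines(); drop blank lines; "\n".join(...) + "\n")
def pvPost (res : List Char) : String :=
  let lines := PySem.Chars.splitlines res
  let clean := lines.filter (fun line => PySem.Chars.strip line != [])
  String.ofList (PySem.Chars.join ['\n'] clean ++ ['\n'])

-- the five values of A's string-valued `state` variable
inductive PvState
  | normal | str | chr | line | block
deriving DecidableEq, Repr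

-- A's while loop as fuel recursion (fuel = len(source) bounds the iteration count: every
-- iteration advances i by at least 1); `source[i]` is always in range (i < len) so `getD` is exact
def pvLoopA (cs : List Char) (fuel : Nat) (i : Nat) (st : PvState) (res : List Char) : List Char :=
  match fuel with
  | 0 => res
  | fuel + 1 =>
    if i < cs.length then
      let char := cs.getD i ' '
      match st with
      | .normal =>
        if char = '/' ∧ i + 1 < cs.length then
          let next_char := cs.getD (i+1) ' '
          if next_char = '/' then pvLoopA cs fuel (i+2) .line res
          else if next_char = '*' then pvLoopA cs fuel (i+2) .block res
          else pvLoopA cs fuel (i+1) .normal (res ++ [char])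
        else if char = '"' then pvLoopA cs fuel (i+1) .str (res ++ [char])
        else if char = '\'' then pvLoopA cs fuel (i+1) .chr (res ++ [char])
        else pvLoopA cs fuel (i+1) .normal (res ++ [char])
      | .str =>
        if char = '\\' then
          if i + 1 < cs.length then pvLoopA cs fuel (i+2) .str (res ++ [char] ++ [cs.getD (i+1) ' '])
          else pvLoopA cs fuel (i+1) .str (res ++ [char])
        else if char = '"' then pvLoopA cs fuel (i+1) .normal (res ++ [char])
        else pvLoopA cs fuel (i+1) .str (res ++ [char])
      | .chr =>
        if char = '\\' then
          if i + 1 < cs.length then pvLoopA cs fuel (i+2) .chr (res ++ [char] ++ [cs.getD (i+1) ' '])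
          else pvLoopA cs fuel (i+1) .chr (res ++ [char])
        else if char = '\'' then pvLoopA cs fuel (i+1) .normal (res ++ [char])
        else pvLoopA cs fuel (i+1) .chr (res ++ [char])
      | .line =>
        if char = '\n' then pvLoopA cs fuel (i+1) .normal (res ++ [char])
        else pvLoopA cs fuel (i+1) .line res
      | .block =>
        if char = '*' ∧ i + 1 < cs.length ∧ cs.getD (i+1) ' ' = '/' then
          pvLoopA cs fuel (i+2) .normal res
        else pvLoopA cs fuel (i+1) .block res
    else res

def remove_java_comments (source : String) : String :=
  pvPost (pvLoopA source.toList source.toList.length 0 .normal [])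

-- ===== PORT B =====
-- B's inner literal-copying loop (quote char q); returns (out, final j); fuel recursion as above
def pvLitB (cs : List Char) (q : Char) (fuel : Nat) (j : Nat) (out : List Char) : List Char × Nat :=
  match fuel with
  | 0 => (out, j)
  | fuel + 1 =>
    if j < cs.length then
      let d := cs.getD j ' '
      if d = '\\' then
        if j + 1 < cs.length then pvLitB cs q fuel (j+2) (out ++ [d] ++ [cs.getD (j+1) ' '])
        else pvLitB cs q fuel (j+1) (out ++ [d])
      else if d = q then (out ++ [d], j)
      else pvLitB cs q fuel (j+1) (out ++ [d])
    else (out, j)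

-- B's outer jump-scan loop (fuel recursion; each iteration advances i by at least 1)
def pvLoopB (cs : List Char) (fuel : Nat) (i : Nat) (out : List Char) : List Char :=
  match fuel with
  | 0 => out
  | fuel + 1 =>
    if i < cs.length then
      let c := cs.getD i ' '
      if c = '/' ∧ i + 1 < cs.length ∧ cs.getD (i+1) ' ' = '/' then
        let j := PySem.Chars.findFrom cs ['\n'] ((i + 2 : Nat) : Int)
        pvLoopB cs fuel (if j = -1 then cs.length else j.toNat) out
      else if c = '/' ∧ i + 1 < cs.length ∧ cs.getD (i+1) ' ' = '*' then
        let j := PySem.Chars.findFrom cs ['*', '/'] ((i + 2 : Nat) : Int)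
        pvLoopB cs fuel (if j = -1 then cs.length else j.toNat + 2) out
      else if c = '"' ∨ c = '\'' then
        let r := pvLitB cs c cs.length (i+1) (out ++ [c])
        pvLoopB cs fuel (r.2 + 1) r.1
      else pvLoopB cs fuel (i+1) (out ++ [c])
    else out

def remove_java_comments_alt (source : String) : String :=
  pvPost (pvLoopB source.toList source.toList.length 0 [])

-- ===== PRECONDITION & SPEC =====
def Spec_remove_java_comments (source : String) (out : String) : Prop := out = remove_java_comments_alt source
instance (source : String) (out : String) : Decidable (Spec_remove_java_comments source out) := by unfold Spec_remove_java_comments; infer_instance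

-- ===== CLAIM (what is proved, stated in full; the proofs are below) =====
def Claim_equal_remove_java_comments : Prop := ∀ (source : String), Dom_remove_java_comments source → Spec_remove_java_comments source (remove_java_comments source)

-- ===== LEMMAS AND PROOFS =====

theorem go_shift (sub : List Char) (hs : sub.isEmpty = false) (t : List Char) : ∀ (k : Nat), PySem.Chars.find.go sub t (k+1) = if PySem.Chars.find.go sub t k = -1 then -1 else PySem.Chars.find.go sub t k + 1 := by
  induction t with
  | nil => intro k; simp [PySem.Chars.find.go, hs]
  | cons a t IH =>
    intro k
    rw [PySem.Chars.find.go, PySem.Chars.find.go]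
    split
    · simp
    · rw [IH (k+1)]

theorem go_ge (sub : List Char) (t : List Char) : ∀ (k : Nat), PySem.Chars.find.go sub t k = -1 ∨ 0 ≤ PySem.Chars.find.go sub t k := by
  induction t with
  | nil => intro k; rw [PySem.Chars.find.go]; split <;> simp
  | cons a t IH =>
    intro k
    rw [PySem.Chars.find.go]
    split
    · right; positivity
    · exact IH (k+1)

theorem find_cons (sub : List Char) (hs : sub.isEmpty = false) (a : Char) (t : List Char) :
    PySem.Chars.find (a :: t) sub =
      if sub.isPrefixOf (a :: t) then 0
      else if PySem.Chars.find t sub = -1 then -1 else PySem.Chars.find t sub + 1 := by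
  show PySem.Chars.find.go sub (a :: t) 0 = _
  rw [PySem.Chars.find.go]
  split
  · rfl
  · exact go_shift sub hs t 0

theorem findStep (cs sub : List Char) (hs : sub.isEmpty = false) (i : Nat) (hi : i < cs.length) :
    PySem.Chars.findFrom cs sub ((i : Nat) : Int) =
      if sub <+: cs.drop i then ((i : Nat) : Int)
      else PySem.Chars.findFrom cs sub ((i + 1 : Nat) : Int) := by
  rw [PySem.Chars.findFrom_natCast cs sub i (by omega), PySem.Chars.findFrom_natCast cs sub (i+1) (by omega)]
  have hdrop : cs.drop i = cs[i] :: cs.drop (i+1) := List.drop_eq_getElem_cons hi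
  rw [hdrop, find_cons sub hs, ← hdrop]
  by_cases hp : sub <+: cs.drop i
  · have hp' : sub.isPrefixOf (cs.drop i) = true := List.isPrefixOf_iff_prefix.mpr hp
    simp [hp, hp']
  · have hp' : sub.isPrefixOf (cs.drop i) = false :=
      Bool.eq_false_iff.mpr (fun hc => hp (List.isPrefixOf_iff_prefix.mp hc))
    rcases go_ge sub (cs.drop (i+1)) 0 with hg | hg
    · have hf : PySem.Chars.find (cs.drop (i+1)) sub = -1 := hg
      simp [hp, hp', hf]
    · have hne : PySem.Chars.find (cs.drop (i+1)) sub ≠ -1 := by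
        show PySem.Chars.find.go sub (cs.drop (i+1)) 0 ≠ -1; omega
      have hne' : PySem.Chars.find (cs.drop (i+1)) sub + 1 ≠ -1 := by
        show PySem.Chars.find.go sub (cs.drop (i+1)) 0 + 1 ≠ -1; omega
      simp only [hp, hp', Bool.false_eq_true, if_false, hne, hne']
      push_cast; ring

theorem findEnd (cs sub : List Char) (hs : sub.isEmpty = false) :
    PySem.Chars.findFrom cs sub ((cs.length : Nat) : Int) = -1 := by
  rw [PySem.Chars.findFrom_natCast cs sub cs.length (le_refl _)]
  simp [PySem.Chars.find, PySem.Chars.find.go, hs]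



theorem prefix_single_iff (cs : List Char) (c : Char) (i : Nat) (hi : i < cs.length) :
    ([c] <+: cs.drop i) ↔ cs.getD i ' ' = c := by
  rw [List.drop_eq_getElem_cons hi, List.cons_prefix_cons, List.getD_eq_getElem cs ' ' hi]
  simp [eq_comm]

theorem prefix_single_facts (cs : List Char) (c : Char) (p : Nat) (h : [c] <+: cs.drop p) :
    p < cs.length ∧ cs.getD p ' ' = c := by
  have hl := h.length_le
  simp [List.length_drop] at hl
  have hp : p < cs.length := by omega
  exact ⟨hp, (prefix_single_iff cs c p hp).mp h⟩

theorem prefix_pair_iff (cs : List Char) (a b : Char) (i : Nat) (hi : i < cs.length) :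
    ([a, b] <+: cs.drop i) ↔ cs.getD i ' ' = a ∧ i + 1 < cs.length ∧ cs.getD (i+1) ' ' = b := by
  rw [List.drop_eq_getElem_cons hi, List.cons_prefix_cons, List.getD_eq_getElem cs ' ' hi]
  by_cases h2 : i + 1 < cs.length
  · rw [prefix_single_iff cs b (i+1) h2]
    simp [h2, eq_comm]
  · have hnil : cs.drop (i+1) = [] := List.drop_eq_nil_of_le (by omega)
    simp [hnil, h2]

theorem prefix_pair_facts (cs : List Char) (a b : Char) (p : Nat) (h : [a, b] <+: cs.drop p) :
    p + 1 < cs.length ∧ cs.getD p ' ' = a ∧ cs.getD (p+1) ' ' = b := by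
  have hl := h.length_le
  simp [List.length_drop] at hl
  have hp : p < cs.length := by omega
  have := (prefix_pair_iff cs a b p hp).mp h
  tauto


-- both loops and the literal loop ignore fuel beyond the remaining length / stop at once past the end
theorem pvLoopA_stop (cs : List Char) (f i : Nat) (st : PvState) (res : List Char) (hi : ¬ i < cs.length) : pvLoopA cs f i st res = res := by
  cases f <;> simp [pvLoopA, hi]

theorem pvLoopB_stop (cs : List Char) (f i : Nat) (out : List Char) (hi : ¬ i < cs.length) : pvLoopB cs f i out = out := by
  cases f <;> simp [pvLoopB, hi]

theorem pvLitB_stop (cs : List Char) (q : Char) (f j : Nat) (out : List Char) (hj : ¬ j < cs.length) : pvLitB cs q f j out = (out, j) := by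
  cases f <;> simp [pvLitB, hj]

theorem pvLoopA_fuel (cs : List Char) : ∀ (f g i : Nat) (st : PvState) (res : List Char), cs.length - i ≤ f → cs.length - i ≤ g → pvLoopA cs f i st res = pvLoopA cs g i st res := by
  intro f
  induction f with
  | zero =>
    intro g i st res hf hg
    have hi : ¬ i < cs.length := by omega
    rw [pvLoopA_stop cs _ i st res hi, pvLoopA_stop cs g i st res hi]
  | succ f IH =>
    intro g i st res hf hg
    by_cases hi : i < cs.length
    · cases g with
      | zero => omega
      | succ g =>
        simp only [pvLoopA, hi, if_true]
        cases st <;> (try dsimp only) <;> (split_ifs <;> (first | rfl | exact IH _ _ _ _ (by omega) (by omega)))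
    · rw [pvLoopA_stop cs _ i st res hi, pvLoopA_stop cs g i st res hi]

theorem pvLitB_snd_ge (cs : List Char) (q : Char) : ∀ (f j : Nat) (out : List Char), j ≤ (pvLitB cs q f j out).2 := by
  intro f
  induction f with
  | zero => intro j out; simp [pvLitB]
  | succ f IH =>
    intro j out
    by_cases hj : j < cs.length
    · simp only [pvLitB, hj, if_true]
      try dsimp only
      split_ifs with h1 h2 h3
      · have := IH (j+2) (out ++ [cs.getD j ' '] ++ [cs.getD (j+1) ' ']); omega
      · have := IH (j+1) (out ++ [cs.getD j ' ']); omega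
      · simp
      · have := IH (j+1) (out ++ [cs.getD j ' ']); omega
    · simp [pvLitB, hj]

theorem skipLineA (cs : List Char) : ∀ (f g i : Nat) (res : List Char), cs.length - i ≤ f → cs.length - i ≤ g → i ≤ cs.length →
    pvLoopA cs f i .line res =
      (if PySem.Chars.findFrom cs ['\n'] ((i : Nat) : Int) = -1 then res
       else pvLoopA cs g ((PySem.Chars.findFrom cs ['\n'] ((i : Nat) : Int)).toNat + 1) .normal (res ++ ['\n'])) := by
  intro f
  induction f with
  | zero =>
    intro g i res hf hg hi2
    have hie : i = cs.length := by omega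
    subst hie
    rw [pvLoopA_stop cs 0 _ _ _ (by omega), findEnd cs ['\n'] (by decide)]
    simp
  | succ f IH =>
    intro g i res hf hg hi2
    by_cases hi : i < cs.length
    · rw [findStep cs ['\n'] (by decide) i hi]
      by_cases hc : cs.getD i ' ' = '\n'
      · have hp : ['\n'] <+: cs.drop i := (prefix_single_iff cs '\n' i hi).mpr hc
        have hc' : cs[i] = '\n' := by rw [← List.getD_eq_getElem cs ' ' hi]; exact hc
        have hstep : pvLoopA cs (f+1) i .line res = pvLoopA cs f (i+1) .normal (res ++ ['\n']) := by
          simp [pvLoopA, hi, hc']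
        rw [hstep]
        simp only [hp, if_pos]
        rw [if_neg (by omega)]
        have ht : ((i : Int)).toNat = i := rfl
        rw [ht]
        exact pvLoopA_fuel cs f g (i+1) .normal (res ++ ['\n']) (by omega) (by omega)
      · have hp : ¬(['\n'] <+: cs.drop i) := fun h => hc ((prefix_single_iff cs '\n' i hi).mp h)
        have hstep : pvLoopA cs (f+1) i .line res = pvLoopA cs f (i+1) .line res := by
          simp only [pvLoopA, hi, if_true]
          rw [if_neg hc]
        rw [hstep]
        simp only [hp, if_neg, if_false]
        exact IH g (i+1) res (by omega) (by omega) (by omega)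
    · have hie : i = cs.length := by omega
      subst hie
      rw [pvLoopA_stop cs _ _ _ _ (by omega), findEnd cs ['\n'] (by decide)]
      simp

theorem skipBlockA (cs : List Char) : ∀ (f g i : Nat) (res : List Char), cs.length - i ≤ f → cs.length - i ≤ g → i ≤ cs.length →
    pvLoopA cs f i .block res =
      (if PySem.Chars.findFrom cs ['*', '/'] ((i : Nat) : Int) = -1 then res
       else pvLoopA cs g ((PySem.Chars.findFrom cs ['*', '/'] ((i : Nat) : Int)).toNat + 2) .normal res) := by
  intro f
  induction f with
  | zero =>
    intro g i res hf hg hi2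
    have hie : i = cs.length := by omega
    subst hie
    rw [pvLoopA_stop cs 0 _ _ _ (by omega), findEnd cs ['*', '/'] (by decide)]
    simp
  | succ f IH =>
    intro g i res hf hg hi2
    by_cases hi : i < cs.length
    · rw [findStep cs ['*', '/'] (by decide) i hi]
      by_cases hc : cs.getD i ' ' = '*' ∧ i + 1 < cs.length ∧ cs.getD (i+1) ' ' = '/'
      · have hp : ['*', '/'] <+: cs.drop i := (prefix_pair_iff cs '*' '/' i hi).mpr hc
        have hc' : cs[i] = '*' := by rw [← List.getD_eq_getElem cs ' ' hi]; exact hc.1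
        have hc2' : cs[i+1] = '/' := by rw [← List.getD_eq_getElem cs ' ' hc.2.1]; exact hc.2.2
        have hstep : pvLoopA cs (f+1) i .block res = pvLoopA cs f (i+2) .normal res := by
          simp [pvLoopA, hi, hc', hc.2.1, hc2']
        rw [hstep]
        simp only [hp, if_pos]
        rw [if_neg (by omega)]
        have ht : ((i : Int)).toNat = i := rfl
        rw [ht]
        exact pvLoopA_fuel cs f g (i+2) .normal res (by omega) (by omega)
      · have hp : ¬(['*', '/'] <+: cs.drop i) := fun h => hc ((prefix_pair_iff cs '*' '/' i hi).mp h)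
        have hstep : pvLoopA cs (f+1) i .block res = pvLoopA cs f (i+1) .block res := by
          simp only [pvLoopA, hi, if_true]
          rw [if_neg hc]
        rw [hstep]
        simp only [hp, if_neg, if_false]
        exact IH g (i+1) res (by omega) (by omega) (by omega)
    · have hie : i = cs.length := by omega
      subst hie
      rw [pvLoopA_stop cs _ _ _ _ (by omega), findEnd cs ['*', '/'] (by decide)]
      simp

theorem skipStrA (cs : List Char) : ∀ (f g h j : Nat) (out : List Char), cs.length - j ≤ f → cs.length - j ≤ g → cs.length - j ≤ h →
    pvLoopA cs f j .str out =
      (if (pvLitB cs '"' h j out).2 < cs.length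
       then pvLoopA cs g ((pvLitB cs '"' h j out).2 + 1) .normal (pvLitB cs '"' h j out).1
       else (pvLitB cs '"' h j out).1) := by
  intro f
  induction f with
  | zero =>
    intro g h j out hf hg hh
    have hj : ¬ j < cs.length := by omega
    rw [pvLoopA_stop cs 0 _ _ _ hj, pvLitB_stop cs '"' h j out hj]
    simp [hj]
  | succ f IH =>
    intro g h j out hf hg hh
    by_cases hj : j < cs.length
    · obtain ⟨h', rfl⟩ : ∃ h', h = h' + 1 := ⟨h - 1, by omega⟩
      have hd : cs.getD j ' ' = cs[j] := List.getD_eq_getElem cs ' ' hj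
      simp only [pvLoopA, pvLitB, hj, if_true]
      by_cases h1 : cs[j] = '\\'
      · by_cases h2 : j + 1 < cs.length
        · simp only [hd, h1, if_true, h2]
          have h5 := IH g h' (j+2) (out ++ [cs[j]] ++ [cs.getD (j+1) ' ']) (by omega) (by omega) (by omega)
          rw [h1] at h5; exact h5
        · simp only [hd, h1, if_true, h2, if_false]
          have h5 := IH g h' (j+1) (out ++ [cs[j]]) (by omega) (by omega) (by omega)
          rw [h1] at h5; exact h5
      · by_cases h3 : cs[j] = '"'
        · simp [hj, hd, h3]
          exact pvLoopA_fuel cs f g (j+1) .normal (out ++ ['"']) (by omega) (by omega)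
        · simp only [hd, h1, h3, if_false]
          exact IH g h' (j+1) (out ++ [cs[j]]) (by omega) (by omega) (by omega)
    · rw [pvLoopA_stop cs _ _ _ _ hj, pvLitB_stop cs '"' h j out hj]
      simp [hj]

theorem skipChrA (cs : List Char) : ∀ (f g h j : Nat) (out : List Char), cs.length - j ≤ f → cs.length - j ≤ g → cs.length - j ≤ h →
    pvLoopA cs f j .chr out =
      (if (pvLitB cs '\'' h j out).2 < cs.length
       then pvLoopA cs g ((pvLitB cs '\'' h j out).2 + 1) .normal (pvLitB cs '\'' h j out).1
       else (pvLitB cs '\'' h j out).1) := by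
  intro f
  induction f with
  | zero =>
    intro g h j out hf hg hh
    have hj : ¬ j < cs.length := by omega
    rw [pvLoopA_stop cs 0 _ _ _ hj, pvLitB_stop cs '\'' h j out hj]
    simp [hj]
  | succ f IH =>
    intro g h j out hf hg hh
    by_cases hj : j < cs.length
    · obtain ⟨h', rfl⟩ : ∃ h', h = h' + 1 := ⟨h - 1, by omega⟩
      have hd : cs.getD j ' ' = cs[j] := List.getD_eq_getElem cs ' ' hj
      simp only [pvLoopA, pvLitB, hj, if_true]
      by_cases h1 : cs[j] = '\\'
      · by_cases h2 : j + 1 < cs.length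
        · simp only [hd, h1, if_true, h2]
          have h5 := IH g h' (j+2) (out ++ [cs[j]] ++ [cs.getD (j+1) ' ']) (by omega) (by omega) (by omega)
          rw [h1] at h5; exact h5
        · simp only [hd, h1, if_true, h2, if_false]
          have h5 := IH g h' (j+1) (out ++ [cs[j]]) (by omega) (by omega) (by omega)
          rw [h1] at h5; exact h5
      · by_cases h3 : cs[j] = '\''
        · simp [hj, hd, h3]
          exact pvLoopA_fuel cs f g (j+1) .normal (out ++ ['\'']) (by omega) (by omega)
        · simp only [hd, h1, h3, if_false]
          exact IH g h' (j+1) (out ++ [cs[j]]) (by omega) (by omega) (by omega)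
    · rw [pvLoopA_stop cs _ _ _ _ hj, pvLitB_stop cs '\'' h j out hj]
      simp [hj]

theorem pv_main (cs : List Char) : ∀ (k f g i : Nat) (res : List Char), cs.length - i ≤ k → cs.length - i ≤ f → cs.length - i ≤ g → pvLoopA cs f i .normal res = pvLoopB cs g i res := by
  intro k
  induction k with
  | zero =>
    intro f g i res hk hf hg
    have hi : ¬ i < cs.length := by omega
    rw [pvLoopA_stop cs f i _ res hi, pvLoopB_stop cs g i res hi]
  | succ k IH =>
    intro f g i res hk hf hg
    by_cases hi : i < cs.length
    · obtain ⟨f, rfl⟩ : ∃ f', f = f' + 1 := ⟨f - 1, by omega⟩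
      obtain ⟨g, rfl⟩ : ∃ g', g = g' + 1 := ⟨g - 1, by omega⟩
      have hd : cs.getD i ' ' = cs[i] := List.getD_eq_getElem cs ' ' hi
      simp only [pvLoopA, pvLoopB, hi, if_true]
      by_cases h1 : cs[i] = '/' ∧ i + 1 < cs.length ∧ cs.getD (i+1) ' ' = '/'
      · -- "//" : A enters LINE_COMMENT, B jumps to the next newline
        simp only [hd, h1.1, h1.2.1, h1.2.2]
        simp
        have hsl := skipLineA cs f f (i+2) res (by omega) (by omega) (by omega)
        push_cast at hsl
        rw [hsl]
        by_cases hj : PySem.Chars.findFrom cs ['\n'] ((i : Int) + 2) = -1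
        · rw [if_pos hj, if_pos hj]
          rw [pvLoopB_stop cs g cs.length res (by omega)]
        · have hsp := PySem.Chars.findFrom_natCast_spec cs ['\n'] (i+2) (by omega)
          push_cast at hsp
          obtain ⟨hge, hpre, -⟩ := hsp hj
          obtain ⟨hplt, hpc⟩ := prefix_single_facts cs '\n' _ hpre
          have hpge : i + 2 ≤ (PySem.Chars.findFrom cs ['\n'] ((i : Int) + 2)).toNat := by omega
          rw [if_neg hj, if_neg hj]
          obtain ⟨g, rfl⟩ : ∃ g'', g = g'' + 1 := ⟨g - 1, by omega⟩
          simp only [pvLoopB, hplt, if_true]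
          simp only [hpc]
          rw [if_neg (by simp), if_neg (by simp), if_neg (by simp)]
          exact IH f g _ (res ++ ['\n']) (by omega) (by omega) (by omega)
      · by_cases h2 : cs[i] = '/' ∧ i + 1 < cs.length ∧ cs.getD (i+1) ' ' = '*'
        · -- "/*" : A enters BLOCK_COMMENT, B jumps past the next "*/"
          simp only [hd, h2.1, h2.2.1, h2.2.2]
          simp
          have hsb := skipBlockA cs f g (i+2) res (by omega) (by omega) (by omega)
          push_cast at hsb
          rw [hsb]
          by_cases hj : PySem.Chars.findFrom cs ['*', '/'] ((i : Int) + 2) = -1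
          · rw [if_pos hj, if_pos hj]
            rw [pvLoopB_stop cs g cs.length res (by omega)]
          · have hsp := PySem.Chars.findFrom_natCast_spec cs ['*', '/'] (i+2) (by omega)
            push_cast at hsp
            obtain ⟨hge, hpre, -⟩ := hsp hj
            obtain ⟨hplt, -, -⟩ := prefix_pair_facts cs '*' '/' _ hpre
            have hpge : i + 2 ≤ (PySem.Chars.findFrom cs ['*', '/'] ((i : Int) + 2)).toNat := by omega
            rw [if_neg hj, if_neg hj]
            exact IH g g _ res (by omega) (by omega) (by omega)
        · by_cases h3 : cs[i] = '"' ∨ cs[i] = '\''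
          · rcases h3 with hq | hq
            · -- '"' : A enters STRING, B runs the literal loop
              simp only [hd, hq]
              simp
              rw [skipStrA cs f g cs.length (i+1) (res ++ ['"']) (by omega) (by omega) (by omega)]
              have hr2 := pvLitB_snd_ge cs '"' cs.length (i+1) (res ++ ['"'])
              by_cases hrn : (pvLitB cs '"' cs.length (i+1) (res ++ ['"'])).2 < cs.length
              · rw [if_pos hrn]
                exact IH g g _ _ (by omega) (by omega) (by omega)
              · rw [if_neg hrn]
                rw [pvLoopB_stop cs g _ _ (by omega)]
            · -- '\'' : A enters CHAR, B runs the literal loop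
              simp only [hd, hq]
              simp
              rw [skipChrA cs f g cs.length (i+1) (res ++ ['\'']) (by omega) (by omega) (by omega)]
              have hr2 := pvLitB_snd_ge cs '\'' cs.length (i+1) (res ++ ['\''])
              by_cases hrn : (pvLitB cs '\'' cs.length (i+1) (res ++ ['\''])).2 < cs.length
              · rw [if_pos hrn]
                exact IH g g _ _ (by omega) (by omega) (by omega)
              · rw [if_neg hrn]
                rw [pvLoopB_stop cs g _ _ (by omega)]
          · -- ordinary character: both append it and move on
            have h3a : ¬ cs[i] = '"' := fun h => h3 (Or.inl h)
            have h3b : ¬ cs[i] = '\'' := fun h => h3 (Or.inr h)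
            simp only [hd]
            by_cases hc : cs[i] = '/' ∧ i + 1 < cs.length
            · have hs1 : ¬ cs.getD (i+1) ' ' = '/' := fun hn => h1 ⟨hc.1, hc.2, hn⟩
              have hs2 : ¬ cs.getD (i+1) ' ' = '*' := fun hn => h2 ⟨hc.1, hc.2, hn⟩
              rw [if_pos hc, if_neg hs1, if_neg hs2, if_neg h1, if_neg h2, if_neg h3]
              exact IH f g (i+1) (res ++ [cs[i]]) (by omega) (by omega) (by omega)
            · rw [if_neg hc, if_neg h3a, if_neg h3b, if_neg h1, if_neg h2, if_neg h3]
              exact IH f g (i+1) (res ++ [cs[i]]) (by omega) (by omega) (by omega)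
    · rw [pvLoopA_stop cs f i _ res hi, pvLoopB_stop cs g i res hi]

-- ===== VERDICT (by name: the statement is the Claim_ definition above) =====
theorem remove_java_comments_spec : Claim_equal_remove_java_comments := by
  intro source _
  unfold Spec_remove_java_comments remove_java_comments remove_java_comments_alt
  rw [pv_main source.toList source.toList.length source.toList.length source.toList.length 0 [] (by omega) (by omega) (by omega)]
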